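-- pv_equiv track=rewrite | github.com/humansys/raise | src/raise_cli/discovery/analyzer.py | match_path_category
-- ===== SOURCE A (Python) =====
-- DEFAULT_CATEGORY_MAP: dict[str, str] = {
--     # Python (raise-cli conventions)
--     "cli/commands/": "command",
--     "cli/": "utility",
--     "schemas/": "schema",
--     "models/": "model",
--     "output/": "formatter",
--     "governance/": "parser",
--     "context/": "builder",
--     "discovery/": "service",
--     "memory/": "service",
--     "onboarding/": "service",
--     "config/": "utility",
--     "core/": "utility",
--     "telemetry/": "service",
--     # Laravel/PHP
--     "Controllers/": "controller",
--     "Models/": "model",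
--     "Middleware/": "middleware",
--     "Providers/": "provider",
--     "Services/": "service",
--     "Requests/": "schema",
--     "Resources/": "formatter",
--     "routes/": "route",
--     "Migrations/": "migration",
--     # Svelte/TS/JS
--     "components/": "component",
--     "stores/": "store",
--     "lib/": "utility",
--     "utils/": "utility",
--     "types/": "schema",
--     "hooks/": "utility",
--     "api/": "service",
--     # C#/.NET (Clean Architecture conventions — leaf directories only,
--     # avoid broad layer dirs like Infrastructure/ that shadow more specific ones)
--     "Repositories/": "repository",
--     "Handlers/": "service",
--     "Commands/": "command",
--     "Queries/": "query",
--     "Validators/": "validator",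
-- }
--
-- def match_path_category(
--     file_path: str,
--     category_map: dict[str, str] | None = None,
-- ) -> str | None:
--     """Match a file path against convention-based category patterns.
--
--     Uses longest-prefix matching to ensure more specific paths
--     (e.g., "cli/commands/") win over less specific ones (e.g., "cli/").
--
--     Args:
--         file_path: Relative path to the source file.
--         category_map: Custom category map. If None, uses DEFAULT_CATEGORY_MAP.
--
--     Returns:
--         Category string if a match is found, None otherwise.
--
--     Example:
--         >>> match_path_category("src/raise_cli/cli/commands/discover.py")
--         'command'
--         >>> match_path_category("src/raise_cli/unknown/foo.py")
--     """
--     categories = category_map if category_map is not None else DEFAULT_CATEGORY_MAP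
--
--     # Match on directory boundaries: pattern must be preceded by "/" or be at
--     # the start of the path. This prevents "cli/" matching "raise_cli/".
--     # Check all occurrences of the pattern (not just the first).
--     best_match: str | None = None
--     best_length = 0
--
--     for pattern, category in categories.items():
--         # Search all occurrences of pattern in file_path
--         start = 0
--         while True:
--             idx = file_path.find(pattern, start)
--             if idx < 0:
--                 break
--             # Ensure directory boundary (preceded by "/" or at start)
--             if idx == 0 or file_path[idx - 1] == "/":
--                 if len(pattern) > best_length:
--                     best_match = category
--                     best_length = len(pattern)
--                 break  # Found valid match for this pattern
--             start = idx + 1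
--
--     return best_match
-- ===== SOURCE B (Python) =====
-- DEFAULT_CATEGORY_MAP: dict[str, str] = {
--     "cli/commands/": "command",
--     "cli/": "utility",
--     "schemas/": "schema",
--     "models/": "model",
--     "output/": "formatter",
--     "governance/": "parser",
--     "context/": "builder",
--     "discovery/": "service",
--     "memory/": "service",
--     "onboarding/": "service",
--     "config/": "utility",
--     "core/": "utility",
--     "telemetry/": "service",
--     "Controllers/": "controller",
--     "Models/": "model",
--     "Middleware/": "middleware",
--     "Providers/": "provider",
--     "Services/": "service",
--     "Requests/": "schema",
--     "Resources/": "formatter",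
--     "routes/": "route",
--     "Migrations/": "migration",
--     "components/": "component",
--     "stores/": "store",
--     "lib/": "utility",
--     "utils/": "utility",
--     "types/": "schema",
--     "hooks/": "utility",
--     "api/": "service",
--     "Repositories/": "repository",
--     "Handlers/": "service",
--     "Commands/": "command",
--     "Queries/": "query",
--     "Validators/": "validator",
-- }
--
--
-- def match_path_category(
--     file_path: str,
--     category_map: dict[str, str] | None = None,
-- ) -> str | None:
--     categories = category_map if category_map is not None else DEFAULT_CATEGORY_MAP
--     # Directory-boundary positions: the start, and the position after each "/".
--     boundaries = [0] + [i + 1 for i, c in enumerate(file_path) if c == "/"]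
--     candidates = [
--         (pattern, category)
--         for pattern, category in categories.items()
--         if pattern and any(file_path[pos:].startswith(pattern) for pos in boundaries)
--     ]
--     if not candidates:
--         return None
--     return max(candidates, key=lambda pc: len(pc[0]))[1]
-- ===== Notes on version B (the rewrite author's own statement) =====
-- stated objective: alternative
-- what changed: Instead of scanning every occurrence of each pattern with a find-loop and keeping a running best, B precomputes the directory-boundary positions once, selects the patterns that are a prefix of the path at some boundary by a comprehension, and picks the winner with max by pattern length (Python's max keeps the first maximum, preserving the dict-order tie-break).
import Mathlib
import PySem

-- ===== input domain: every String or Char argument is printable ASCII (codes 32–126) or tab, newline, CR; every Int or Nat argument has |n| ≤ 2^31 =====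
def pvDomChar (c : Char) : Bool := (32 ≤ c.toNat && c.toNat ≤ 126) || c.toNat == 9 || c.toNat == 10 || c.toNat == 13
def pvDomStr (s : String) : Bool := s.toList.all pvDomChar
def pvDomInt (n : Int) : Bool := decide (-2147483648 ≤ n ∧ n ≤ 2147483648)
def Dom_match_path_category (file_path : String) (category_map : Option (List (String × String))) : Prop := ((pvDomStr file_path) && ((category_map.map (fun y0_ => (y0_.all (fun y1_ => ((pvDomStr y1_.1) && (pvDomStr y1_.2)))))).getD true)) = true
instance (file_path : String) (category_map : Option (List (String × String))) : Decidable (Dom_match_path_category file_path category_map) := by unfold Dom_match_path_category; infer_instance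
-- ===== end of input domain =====

-- B replaces A's per-pattern find-occurrence scan by precomputed boundary positions, a
-- comprehension selecting the patterns that are a prefix of the path at some boundary,
-- and max by pattern length (first maximum = dict-order tie-break); objective: alternative.

def pvDefaultCategoryMap : List (String × String) := [
  ("cli/commands/", "command"), ("cli/", "utility"), ("schemas/", "schema"),
  ("models/", "model"), ("output/", "formatter"), ("governance/", "parser"),
  ("context/", "builder"), ("discovery/", "service"), ("memory/", "service"),
  ("onboarding/", "service"), ("config/", "utility"), ("core/", "utility"),
  ("telemetry/", "service"), ("Controllers/", "controller"), ("Models/", "model"),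
  ("Middleware/", "middleware"), ("Providers/", "provider"), ("Services/", "service"),
  ("Requests/", "schema"), ("Resources/", "formatter"), ("routes/", "route"),
  ("Migrations/", "migration"), ("components/", "component"), ("stores/", "store"),
  ("lib/", "utility"), ("utils/", "utility"), ("types/", "schema"),
  ("hooks/", "utility"), ("api/", "service"), ("Repositories/", "repository"),
  ("Handlers/", "service"), ("Commands/", "command"), ("Queries/", "query"),
  ("Validators/", "validator")]

-- ===== PORT A =====
-- A's inner `while True` occurrence scan; `start` strictly increases each pass and is
-- bounded by len(file_path), so fuel `len + 2` makes the recursion total without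
-- changing any computed value.
def pvAFind (fp pat : String) : Nat → Int → Bool
  | 0, _ => false
  | f + 1, start =>
    let idx := PySem.Str.findFrom fp pat start
    if idx < 0 then false
    else if idx == 0 || PySem.Str.pyGet? fp (idx - 1) == some '/' then true
    else pvAFind fp pat f (idx + 1)

def match_path_category (file_path : String) (category_map : Option (List (String × String))) : Option String :=
  let categories := category_map.getD pvDefaultCategoryMap
  (categories.foldl (fun (st : Option String × Int) pc =>
      if pvAFind file_path pc.1 (file_path.toList.length + 2) 0 then
        if PySem.Str.len pc.1 > st.2 then (some pc.2, PySem.Str.len pc.1) else st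
      else st) (none, 0)).1

-- ===== PORT B =====
def match_path_category_alt (file_path : String) (category_map : Option (List (String × String))) : Option String :=
  let categories := category_map.getD pvDefaultCategoryMap
  let boundaries : List Int :=
    0 :: (((PySem.List.enumerate file_path.toList).filter (fun ic => ic.2 == '/')).map (fun ic => ic.1 + 1))
  let candidates := categories.filter (fun pc =>
      pc.1 != "" && boundaries.any (fun pos =>
        -- file_path[pos:].startswith(pattern)
        PySem.Str.startswith (PySem.Str.slice file_path (some pos) none) pc.1))
  if candidates.isEmpty then none
  else
    match PySem.List.max? candidates (fun pc => PySem.Str.len pc.1) with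
    | some pc => some pc.2
    | none => none

-- ===== PRECONDITION & SPEC =====
def Spec_match_path_category (file_path : String) (category_map : Option (List (String × String))) (out : Option String) : Prop := out = match_path_category_alt file_path category_map
instance (file_path : String) (category_map : Option (List (String × String))) (out : Option String) : Decidable (Spec_match_path_category file_path category_map out) := by unfold Spec_match_path_category; infer_instance

-- ===== CLAIM (what is proved, stated in full; the proofs are below) =====
def Claim_equal_match_path_category : Prop := ∀ (file_path : String) (category_map : Option (List (String × String))), Dom_match_path_category file_path category_map → Spec_match_path_category file_path category_map (match_path_category file_path category_map)

-- ===== LEMMAS AND PROOFS =====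

-- "j is a directory-boundary position of l with the pattern p starting there"
def pvHit (l p : List Char) (j : Nat) : Prop :=
  (j = 0 ∨ (0 < j ∧ l[j - 1]? = some '/')) ∧ p <+: l.drop j

-- A's occurrence scan finds a boundary hit at or after k iff one exists.
lemma pvAFind_iff (fp pat : String) (hp : pat.toList ≠ []) :
    ∀ (f k : Nat), k ≤ fp.toList.length → fp.toList.length + 1 ≤ f + k →
      (pvAFind fp pat f (k : Int) = true ↔ ∃ j, k ≤ j ∧ pvHit fp.toList pat.toList j) := by
  intro f
  induction f with
  | zero => intro k hk hf; omega
  | succ f ih =>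
    intro k hk hf
    set l := fp.toList with hl
    set p := pat.toList with hpdef
    by_cases hneg : PySem.Chars.findFrom l p (k : Int) = -1
    · -- no further occurrence at all
      have hno : ¬ p <:+: l.drop k := (PySem.Chars.findFrom_natCast_eq_neg_one_iff l p k hk).mp hneg
      simp only [pvAFind, PySem.Str.findFrom_eq, ← hl, ← hpdef, hneg]
      norm_num
      intro j hj hhit
      exact hno (by
        have := hhit.2
        have h1 : p <+: (l.drop k).drop (j - k) := by
          rw [List.drop_drop]
          have he : k + (j - k) = j := by omega
          rw [he]
          exact hhit.2
        exact h1.isInfix.trans (List.drop_suffix _ _).isInfix)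
    · have hspec := PySem.Chars.findFrom_natCast_spec l p k hk hneg
      set idx := PySem.Chars.findFrom l p (k : Int) with hidx
      obtain ⟨hki, hpre, hmin⟩ := hspec
      have hidx0 : 0 ≤ idx := le_trans (by positivity) hki
      set m := idx.toNat with hm
      have hmi : idx = (m : Int) := (Int.toNat_of_nonneg hidx0).symm
      have hkm : k ≤ m := by omega
      have hmlen : m < l.length := by
        have hne : l.drop m ≠ [] := by
          intro h0
          rw [h0] at hpre
          exact hp (List.prefix_nil.mp hpre)
        have := List.drop_eq_nil_iff (l := l) (i := m)
        by_contra hc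
        exact hne (this.mpr (by omega))
      have hstep : pvAFind fp pat (f + 1) (k : Int) =
          (if idx < 0 then false
           else if idx == 0 || PySem.Str.pyGet? fp (idx - 1) == some '/' then true
           else pvAFind fp pat f (idx + 1)) := by
        simp only [pvAFind, PySem.Str.findFrom_eq, ← hl, ← hpdef, ← hidx]
      have hnotneg : ¬ idx < 0 := by omega
      by_cases hbnd : m = 0 ∨ (0 < m ∧ l[m - 1]? = some '/')
      · -- boundary hit at m: loop returns true, and the existential holds
        have hb : (idx == 0 || PySem.Str.pyGet? fp (idx - 1) == some '/') = true := by
          rcases hbnd with h0 | ⟨hpos, hget⟩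
          · simp [hmi, h0]
          · have hg : PySem.Str.pyGet? fp (idx - 1) = some '/' := by
              rw [PySem.Str.pyGet?_eq, hmi]
              have he : (m : Int) - 1 = ((m - 1 : Nat) : Int) := by omega
              rw [he]
              show PySem.List.pyGet? fp.toList ((m - 1 : Nat) : Int) = some '/'
              rw [PySem.List.pyGet?_natCast]
              exact (by rw [← hl]; exact hget)
            simp only [hg]
            simp
        rw [hstep, if_neg hnotneg, if_pos hb]
        simp only [true_iff]
        exact ⟨m, hkm, hbnd, hpre⟩
      · -- not a boundary: skip past m and recurse
        have hm0 : m ≠ 0 := fun h0 => hbnd (Or.inl h0)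
        have hgets : l[m - 1]? ≠ some '/' := fun hg => hbnd (Or.inr ⟨Nat.pos_of_ne_zero hm0, hg⟩)
        have h1 : (idx == 0) = false := by
          simp only [beq_eq_false_iff_ne, ne_eq, hmi]
          omega
        have h2 : (PySem.Str.pyGet? fp (idx - 1) == some '/') = false := by
          simp only [beq_eq_false_iff_ne, ne_eq]
          rw [PySem.Str.pyGet?_eq, hmi]
          have he : (m : Int) - 1 = ((m - 1 : Nat) : Int) := by omega
          rw [he]
          show ¬ PySem.List.pyGet? fp.toList ((m - 1 : Nat) : Int) = some '/'
          rw [PySem.List.pyGet?_natCast]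
          rw [← hl]
          exact hgets
        rw [hstep, if_neg hnotneg, h1, h2]
        simp only [Bool.or_self, Bool.false_eq_true, if_false]
        have hrec : idx + 1 = ((m + 1 : Nat) : Int) := by omega
        rw [hrec, ih (m + 1) (by omega) (by omega)]
        constructor
        · rintro ⟨j, hj, hhit⟩
          exact ⟨j, by omega, hhit⟩
        · rintro ⟨j, hj, hhit⟩
          refine ⟨j, ?_, hhit⟩
          by_contra hc
          rcases Nat.lt_or_ge j m with hlt | hge
          · exact hmin j hj hlt hhit.2
          · have hjm : j = m := by omega
            rcases hhit.1 with h0 | ⟨hp0, hgv⟩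
            · exact hm0 (by omega)
            · exact hgets (hjm ▸ hgv)


-- B's condition on a pattern says exactly: some boundary hit exists.
lemma pvCondB_iff (fp pat : String) :
    ((0 :: (((PySem.List.enumerate fp.toList).filter (fun ic => ic.2 == '/')).map
        (fun ic => ic.1 + 1)) : List Int).any (fun pos =>
      PySem.Str.startswith (PySem.Str.slice fp (some pos) none) pat) = true) ↔
    ∃ j, pvHit fp.toList pat.toList j := by
  have hsw : ∀ pos : Int, 0 ≤ pos →
      (PySem.Str.startswith (PySem.Str.slice fp (some pos) none) pat = true ↔
        pat.toList <+: fp.toList.drop pos.toNat) := by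
    intro pos hpos
    rw [PySem.Str.startswith_eq, PySem.Str.slice]
    rw [String.toList_ofList]
    show PySem.Chars.startswith (PySem.List.slice fp.toList (some pos) none) pat.toList = true ↔ _
    rw [PySem.List.slice_from fp.toList hpos]
    exact PySem.Chars.startswith_iff _ _
  simp only [List.any_eq_true]
  constructor
  · rintro ⟨pos, hmem, hs⟩
    rcases List.mem_cons.mp hmem with h0 | hmap
    · subst h0
      exact ⟨0, Or.inl rfl, by simpa using (hsw 0 le_rfl).mp hs⟩
    · obtain ⟨ic, hicf, hpos⟩ := List.mem_map.mp hmap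
      obtain ⟨hic, hslash⟩ := List.mem_filter.mp hicf
      obtain ⟨k, hk, hicv⟩ := (PySem.List.mem_enumerate_iff _ _ _).mp hic
      subst hicv
      simp only [zero_add] at hpos hslash
      have hposv : pos = ((k + 1 : Nat) : Int) := by omega
      refine ⟨k + 1, Or.inr ⟨Nat.succ_pos k, ?_⟩, ?_⟩
      · simp only [Nat.add_sub_cancel]
        rw [List.getElem?_eq_getElem hk]
        simpa using (beq_iff_eq.mp hslash)
      · have := (hsw pos (by omega)).mp hs
        rwa [hposv, Int.toNat_natCast] at this
  · rintro ⟨j, hb, hpre⟩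
    rcases hb with h0 | ⟨hjpos, hget⟩
    · exact ⟨0, List.mem_cons_self, (hsw 0 le_rfl).mpr (by simpa [h0] using hpre)⟩
    · have hklen : j - 1 < fp.toList.length := by
        have := List.getElem?_eq_some_iff.mp hget
        exact this.1
      refine ⟨((j : Nat) : Int), ?_, ?_⟩
      · apply List.mem_cons_of_mem
        apply List.mem_map.mpr
        refine ⟨(((j - 1 : Nat) : Int), fp.toList[j - 1]'hklen), ?_, by omega⟩
        apply List.mem_filter.mpr
        constructor
        · exact (PySem.List.mem_enumerate_iff _ _ _).mpr ⟨j - 1, hklen, by simp⟩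
        · have : fp.toList[j - 1]'hklen = '/' := by
            have := List.getElem?_eq_getElem hklen
            rw [this] at hget
            exact Option.some_inj.mp hget
          simp [this]
      · exact (hsw _ (by omega)).mpr (by simpa using hpre)



-- A's running-best fold over the items equals Python's max (first maximum) over the
-- filtered candidate list.
def pvStJ : Option (String × String) → Option String × Int
  | none => (none, 0)
  | some pc => (some pc.2, PySem.Str.len pc.1)

-- one step of the running first-maximum (the fold Python's `max` performs)
def pvStepM (acc : Option (String × String)) (pc : String × String) : Option (String × String) :=
  match acc with
  | none => some pc
  | some m => if PySem.Str.len m.1 < PySem.Str.len pc.1 then some pc else some m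

lemma pvFoldM_eq_max (xs : List (String × String)) :
    xs.foldl pvStepM none = PySem.List.max? xs (fun pc => PySem.Str.len pc.1) := by
  unfold PySem.List.max?
  congr 1
  funext acc pc
  cases acc <;> rfl

lemma pvLen_nonneg (acc : Option (String × String)) : 0 ≤ (pvStJ acc).2 := by
  cases acc with
  | none => simp [pvStJ]
  | some pc => simp [pvStJ, PySem.Str.len]

lemma pvFold_eq (cA cB : String × String → Bool)
    (h1 : ∀ pc, pc.1 ≠ "" → cA pc = cB pc)
    (h2 : ∀ pc, pc.1 = "" → cB pc = false) :
    ∀ (items : List (String × String)) (acc : Option (String × String)),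
      items.foldl (fun st pc =>
          if cA pc then
            (if PySem.Str.len pc.1 > st.2 then (some pc.2, PySem.Str.len pc.1) else st)
          else st) (pvStJ acc)
      = pvStJ ((items.filter cB).foldl pvStepM acc) := by
  intro items
  induction items with
  | nil => intro acc; simp
  | cons pc t ih =>
    intro acc
    by_cases hpat : pc.1 = ""
    · have hcB := h2 pc hpat
      have hlen0 : PySem.Str.len pc.1 = 0 := by simp [PySem.Str.len, hpat]
      have hskip : (if cA pc then
            (if PySem.Str.len pc.1 > (pvStJ acc).2 then (some pc.2, PySem.Str.len pc.1) else pvStJ acc)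
          else pvStJ acc) = pvStJ acc := by
        have := pvLen_nonneg acc
        rw [hlen0]
        split_ifs with h h' <;> first | rfl | omega
      simp only [List.foldl_cons, List.filter_cons, hcB, hskip]
      exact ih acc
    · have hcA := h1 pc hpat
      have hlenpos : 0 < PySem.Str.len pc.1 := by
        simp only [PySem.Str.len]
        have : pc.1.toList ≠ [] := fun h => hpat (by
          have := congrArg String.ofList h
          simpa using this)
        have : 0 < pc.1.toList.length := List.length_pos_iff.mpr this
        omega
      by_cases hc : cB pc = true
      · simp only [List.foldl_cons, List.filter_cons, hc, if_pos, hcA]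
        cases acc with
        | none =>
          have : (if PySem.Str.len pc.1 > (pvStJ none).2 then (some pc.2, PySem.Str.len pc.1)
              else pvStJ none) = pvStJ (some pc) := by
            simp only [pvStJ]
            rw [if_pos (by simpa [pvStJ] using hlenpos)]
          rw [this, show pvStepM none pc = some pc from rfl]
          exact ih (some pc)
        | some m =>
          have hsplit : (if PySem.Str.len pc.1 > (pvStJ (some m)).2 then (some pc.2, PySem.Str.len pc.1)
              else pvStJ (some m))
              = pvStJ (pvStepM (some m) pc) := by
            simp only [pvStJ, pvStepM, gt_iff_lt]
            split_ifs <;> rfl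
          rw [hsplit]
          exact ih _
      · have hcf : cB pc = false := by simpa using hc
        have hskip : (if cA pc then
              (if PySem.Str.len pc.1 > (pvStJ acc).2 then (some pc.2, PySem.Str.len pc.1) else pvStJ acc)
            else pvStJ acc) = pvStJ acc := by
          rw [hcA, hcf]
          simp
        simp only [List.foldl_cons, List.filter_cons, hcf, hskip]
        exact ih acc

-- a max?-style fold started from `some` stays `some`
lemma pvFoldM_some (t : List (String × String)) : ∀ (m : String × String),
    ∃ r, t.foldl pvStepM (some m) = some r := by
  induction t with
  | nil => intro m; exact ⟨m, rfl⟩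
  | cons pc t ih =>
    intro m
    simp only [List.foldl_cons, pvStepM]
    split_ifs <;> exact ih _

-- per-pattern agreement of the two conditions, as Bools
lemma pvCond_eq (fp pat : String) (hp : pat ≠ "") :
    pvAFind fp pat (fp.toList.length + 2) 0 =
      ((0 :: (((PySem.List.enumerate fp.toList).filter (fun ic => ic.2 == '/')).map
          (fun ic => ic.1 + 1)) : List Int).any (fun pos =>
        PySem.Str.startswith (PySem.Str.slice fp (some pos) none) pat)) := by
  have hpl : pat.toList ≠ [] := by
    intro h
    exact hp (by have := congrArg String.ofList h; simpa using this)
  have hA := pvAFind_iff fp pat hpl (fp.toList.length + 2) 0 (Nat.zero_le _) (by omega)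
  rw [Nat.cast_zero] at hA
  have hB := pvCondB_iff fp pat
  have : pvAFind fp pat (fp.toList.length + 2) 0 = true ↔
      ((0 :: (((PySem.List.enumerate fp.toList).filter (fun ic => ic.2 == '/')).map
          (fun ic => ic.1 + 1)) : List Int).any (fun pos =>
        PySem.Str.startswith (PySem.Str.slice fp (some pos) none) pat)) = true := by
    rw [hA, hB]
    constructor
    · rintro ⟨j, _, h⟩; exact ⟨j, h⟩
    · rintro ⟨j, h⟩; exact ⟨j, Nat.zero_le j, h⟩
  exact Bool.coe_iff_coe.mp this


-- ===== VERDICT (by name: the statement is the Claim_ definition above) =====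
theorem match_path_category_spec : Claim_equal_match_path_category := by
  intro fp cm _
  unfold Spec_match_path_category match_path_category match_path_category_alt
  dsimp only
  set categories := cm.getD pvDefaultCategoryMap with hcat
  set cB : String × String → Bool := fun pc =>
      pc.1 != "" && ((0 :: (((PySem.List.enumerate fp.toList).filter (fun ic => ic.2 == '/')).map
          (fun ic => ic.1 + 1)) : List Int).any (fun pos =>
        PySem.Str.startswith (PySem.Str.slice fp (some pos) none) pc.1)) with hcB
  have h1 : ∀ pc : String × String, pc.1 ≠ "" → pvAFind fp pc.1 (fp.toList.length + 2) 0 = cB pc := by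
    intro pc hp
    rw [hcB]
    rw [pvCond_eq fp pc.1 hp]
    have hb : (pc.1 != "") = true := by simpa using hp
    beta_reduce
    rw [hb, Bool.true_and]
  have h2 : ∀ pc : String × String, pc.1 = "" → cB pc = false := by
    intro pc hp
    rw [hcB]
    simp [hp]
  have hfold := pvFold_eq (fun pc => pvAFind fp pc.1 (fp.toList.length + 2) 0) cB h1 h2 categories none
  simp only [pvStJ] at hfold
  rw [hfold]
  rcases hlist : categories.filter cB with _ | ⟨c, t⟩
  · simp
  · obtain ⟨r, hr⟩ := pvFoldM_some t c
    have hstep : List.foldl pvStepM none (c :: t) = some r := by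
      rw [List.foldl_cons, show pvStepM none c = some c from rfl]
      exact hr
    have hmax : PySem.List.max? (c :: t) (fun pc => PySem.Str.len pc.1) = some r := by
      rw [← pvFoldM_eq_max]
      exact hstep
    simp only [List.isEmpty_cons, Bool.false_eq_true, if_false, hstep, hmax]
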